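-- pv_equiv track=rewrite | github.com/sirui-cell/self-first | 24hPnl.py | count_wallet_transactions
-- ===== SOURCE A (Python) =====
-- def count_wallet_transactions(transactions):
--     """
--     统计每个钱包的买入和卖出次数。
--
--     :param transactions: 包含交易信息的列表，每个元素是一个字典，包含 'wallet'、'targetWallet' 和 'type' 字段。
--     :return: 一个字典，格式为 {wallet: 'buy/sell', ...}，表示每个钱包的买入和卖出次数。
--     """
--     wallet_counts = {}
--
--     for tx in transactions:
--         wallet = tx['wallet']
--         tx_type = tx['type']
--
--         if wallet not in wallet_counts:
--             wallet_counts[wallet] = {'buy': 0, 'sell': 0}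
--
--         if tx_type == 'buy':
--             wallet_counts[wallet]['buy'] += 1
--         elif tx_type == 'sell':
--             wallet_counts[wallet]['sell'] += 1
--
--     # 将结果格式化为字符串形式
--     result = {wallet: f"{counts['buy']}/{counts['sell']}" for wallet, counts in wallet_counts.items()}
--
--     return result
-- ===== SOURCE B (Python) =====
-- def count_wallet_transactions(transactions):
--     """Three simple aggregations instead of one stateful nested-dict pass."""
--     wallets = dict.fromkeys(tx['wallet'] for tx in transactions)
--     buy_wallets = [tx['wallet'] for tx in transactions if tx['type'] == 'buy']
--     sell_wallets = [tx['wallet'] for tx in transactions if tx['type'] == 'sell']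
--     return {w: f"{buy_wallets.count(w)}/{sell_wallets.count(w)}" for w in wallets}
-- ===== Notes on version B (the rewrite author's own statement) =====
-- stated objective: simpler
-- what changed: Replaces A's single stateful pass that builds a nested per-wallet counter dict with three independent aggregations (first-seen wallet order via dict.fromkeys, a buy-wallet list and a sell-wallet list whose .count gives each cell) combined in one final comprehension.
import Mathlib
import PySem

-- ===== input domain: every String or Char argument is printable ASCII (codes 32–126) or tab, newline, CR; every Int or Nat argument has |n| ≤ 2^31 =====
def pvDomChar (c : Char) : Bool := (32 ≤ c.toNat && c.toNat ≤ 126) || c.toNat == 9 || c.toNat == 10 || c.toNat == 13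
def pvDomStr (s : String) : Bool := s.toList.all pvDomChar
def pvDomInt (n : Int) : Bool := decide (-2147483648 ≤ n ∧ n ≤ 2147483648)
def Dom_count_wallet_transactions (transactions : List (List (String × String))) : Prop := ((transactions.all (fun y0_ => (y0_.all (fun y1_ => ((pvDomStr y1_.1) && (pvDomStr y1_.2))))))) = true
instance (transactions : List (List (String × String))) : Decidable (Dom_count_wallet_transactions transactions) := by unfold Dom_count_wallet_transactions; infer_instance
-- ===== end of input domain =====

-- B replaces A's single stateful pass over a nested dict by three independent aggregations
-- (first-seen wallet order, buy-wallet list, sell-wallet list) combined at the end; objective: simpler.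

-- tx['wallet'] / tx['type'] (total under Pre_, which demands both keys)
def pvWallet (tx : List (String × String)) : String := (PySem.Dict.mk tx).getD "wallet" ""
def pvType (tx : List (String × String)) : String := (PySem.Dict.mk tx).getD "type" ""
-- f"{b}/{s}"
def pvFmt (b s : Int) : String := String.ofList (PySem.Int.toChars b ++ '/' :: PySem.Int.toChars s)

-- ===== PORT A =====
-- one loop body of A (kept as a helper for the structural recursion)
def pvStepA (d : PySem.Dict String (PySem.Dict String Int)) (tx : List (String × String)) :
    PySem.Dict String (PySem.Dict String Int) :=
  let wallet := pvWallet tx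
  let txType := pvType tx
  let d := if d.contains wallet then d
           else d.insert wallet (PySem.Dict.ofList [("buy", 0), ("sell", 0)])
  if txType == "buy" then
    d.insert wallet ((d.getD wallet PySem.Dict.empty).insert "buy"
      ((d.getD wallet PySem.Dict.empty).getD "buy" 0 + 1))
  else if txType == "sell" then
    d.insert wallet ((d.getD wallet PySem.Dict.empty).insert "sell"
      ((d.getD wallet PySem.Dict.empty).getD "sell" 0 + 1))
  else d

def count_wallet_transactions (transactions : List (List (String × String))) : List (String × String) :=
  let wallet_counts := transactions.foldl pvStepA PySem.Dict.empty
  wallet_counts.items.map (fun p => (p.1, pvFmt (p.2.getD "buy" 0) (p.2.getD "sell" 0)))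

-- ===== PORT B =====
def count_wallet_transactions_alt (transactions : List (List (String × String))) : List (String × String) :=
  let wallets := PySem.List.dedup (transactions.map pvWallet)
  let buyWallets := (transactions.filter (fun tx => pvType tx == "buy")).map pvWallet
  let sellWallets := (transactions.filter (fun tx => pvType tx == "sell")).map pvWallet
  wallets.map (fun w => (w, pvFmt (buyWallets.count w) (sellWallets.count w)))

-- ===== PRECONDITION & SPEC =====
-- Pre_: every transaction dict carries the 'wallet' and 'type' keys; otherwise Python A raises KeyError.
def Pre_count_wallet_transactions (transactions : List (List (String × String))) : Prop :=
  (transactions.all (fun tx => (PySem.Dict.mk tx).contains "wallet" && (PySem.Dict.mk tx).contains "type")) = true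
instance (transactions : List (List (String × String))) : Decidable (Pre_count_wallet_transactions transactions) := by
  unfold Pre_count_wallet_transactions; infer_instance
def pvWitness_count_wallet_transactions : (List (List (String × String))) :=
  [[("wallet", "a"), ("type", "buy")], [("wallet", "b"), ("type", "sell")]]

def Spec_count_wallet_transactions (transactions : List (List (String × String))) (out : List (String × String)) : Prop := out = count_wallet_transactions_alt transactions
instance (transactions : List (List (String × String))) (out : List (String × String)) : Decidable (Spec_count_wallet_transactions transactions out) := by unfold Spec_count_wallet_transactions; infer_instance

-- ===== CLAIM (what is proved, stated in full; the proofs are below) =====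
def Claim_equal_count_wallet_transactions : Prop := ∀ (transactions : List (List (String × String))), Dom_count_wallet_transactions transactions → Pre_count_wallet_transactions transactions → Spec_count_wallet_transactions transactions (count_wallet_transactions transactions)

-- ===== LEMMAS AND PROOFS =====

theorem keys_stepA (d : PySem.Dict String (PySem.Dict String Int)) (tx : List (String × String)) :
    (pvStepA d tx).keys = PySem.Set.add d.keys (pvWallet tx) := by
  unfold pvStepA
  by_cases hc : d.contains (pvWallet tx) = true
  · have hmem : pvWallet tx ∈ d.keys := (PySem.Dict.contains_iff_mem_keys d (pvWallet tx)).mp hc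
    simp only [hc, if_true]
    rw [PySem.Set.add_of_mem hmem]
    split_ifs <;> simp [PySem.Dict.keys_insert_of_contains, hc]
  · have hb : d.contains (pvWallet tx) = false := by simpa using hc
    have hmem : pvWallet tx ∉ d.keys := fun h => by
      simp [(PySem.Dict.contains_iff_mem_keys d (pvWallet tx)).mpr h] at hb
    simp only [hb, if_false, Bool.false_eq_true]
    rw [PySem.Set.add_of_not_mem hmem]
    have hc2 : (d.insert (pvWallet tx) (PySem.Dict.ofList [("buy", 0), ("sell", 0)])).contains (pvWallet tx) = true :=
      PySem.Dict.contains_insert_self _ _ _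
    split_ifs <;>
      simp [PySem.Dict.keys_insert_of_contains, hc2, PySem.Dict.keys_insert_of_not_contains, hb]

theorem lit_getD (k : String) : (PySem.Dict.ofList [("buy",(0:Int)),("sell",0)]).getD k 0 = 0 := by
  by_cases h1 : k = "buy"
  · subst h1; decide
  · by_cases h2 : k = "sell"
    · subst h2; decide
    · refine PySem.Dict.getD_of_not_contains _ _ ?_
      rw [show (PySem.Dict.ofList [("buy",(0:Int)),("sell",0)])
            = PySem.Dict.mk [("buy",0),("sell",0)] from by decide]
      have hb1 : ("buy" : String) ≠ k := fun h => h1 h.symm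
      have hb2 : ("sell" : String) ≠ k := fun h => h2 h.symm
      simp [PySem.Dict.contains_mk, PySem.Dict.contains_empty, hb1, hb2]

theorem buy_stepA (d : PySem.Dict String (PySem.Dict String Int)) (tx : List (String × String)) (w : String) :
    ((pvStepA d tx).getD w PySem.Dict.empty).getD "buy" 0
      = (d.getD w PySem.Dict.empty).getD "buy" 0
        + (if pvType tx == "buy" ∧ pvWallet tx = w then 1 else 0) := by
  unfold pvStepA
  have hlitb : ∀ k, (PySem.Dict.ofList [("buy",(0:Int)),("sell",0)]).getD k 0 = 0 := lit_getD
  by_cases hw : w = pvWallet tx <;>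
    by_cases hc : d.contains (pvWallet tx) = true
  · simp only [hc, if_true]
    split_ifs with h1 h2 <;>
      simp_all [PySem.Dict.getD_insert, PySem.Dict.getD_insert_self]
  · have hb : d.contains (pvWallet tx) = false := by simpa using hc
    have hd : d.getD (pvWallet tx) PySem.Dict.empty = PySem.Dict.empty :=
      PySem.Dict.getD_of_not_contains _ _ hb
    simp only [hb, if_false, Bool.false_eq_true]
    split_ifs with h1 h2 <;>
      simp_all [PySem.Dict.getD_insert, PySem.Dict.getD_empty]
  · simp only [hc, if_true]
    split_ifs with h1 h2 <;>
      simp_all [PySem.Dict.getD_insert]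
  · have hb : d.contains (pvWallet tx) = false := by simpa using hc
    simp only [hb, if_false, Bool.false_eq_true]
    split_ifs with h1 h2 <;>
      simp_all [PySem.Dict.getD_insert]

theorem sell_stepA (d : PySem.Dict String (PySem.Dict String Int)) (tx : List (String × String)) (w : String) :
    ((pvStepA d tx).getD w PySem.Dict.empty).getD "sell" 0
      = (d.getD w PySem.Dict.empty).getD "sell" 0
        + (if pvType tx == "sell" ∧ pvWallet tx = w then 1 else 0) := by
  unfold pvStepA
  have hlitb : ∀ k, (PySem.Dict.ofList [("buy",(0:Int)),("sell",0)]).getD k 0 = 0 := lit_getD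
  by_cases hw : w = pvWallet tx <;>
    by_cases hc : d.contains (pvWallet tx) = true
  · simp only [hc, if_true]
    split_ifs with h1 h2 <;>
      simp_all [PySem.Dict.getD_insert, PySem.Dict.getD_insert_self]
  · have hb : d.contains (pvWallet tx) = false := by simpa using hc
    have hd : d.getD (pvWallet tx) PySem.Dict.empty = PySem.Dict.empty :=
      PySem.Dict.getD_of_not_contains _ _ hb
    simp only [hb, if_false, Bool.false_eq_true]
    split_ifs with h1 h2 <;>
      simp_all [PySem.Dict.getD_insert, PySem.Dict.getD_empty]
  · simp only [hc, if_true]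
    split_ifs with h1 h2 <;>
      simp_all [PySem.Dict.getD_insert]
  · have hb : d.contains (pvWallet tx) = false := by simpa using hc
    simp only [hb, if_false, Bool.false_eq_true]
    split_ifs with h1 h2 <;>
      simp_all [PySem.Dict.getD_insert]

theorem keys_foldl_stepA (l : List (List (String × String))) (d : PySem.Dict String (PySem.Dict String Int)) :
    (l.foldl pvStepA d).keys = PySem.Set.update d.keys (l.map pvWallet) := by
  induction l generalizing d with
  | nil => rfl
  | cons tx l ih =>
      rw [List.foldl_cons, ih, keys_stepA, List.map_cons, PySem.Set.update_cons]

theorem buy_foldl_stepA (l : List (List (String × String))) (d : PySem.Dict String (PySem.Dict String Int)) (w : String) :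
    ((l.foldl pvStepA d).getD w PySem.Dict.empty).getD "buy" 0
      = (d.getD w PySem.Dict.empty).getD "buy" 0
        + (((l.filter (fun tx => pvType tx == "buy")).map pvWallet).count w : Int) := by
  induction l generalizing d with
  | nil => simp
  | cons tx l ih =>
      rw [List.foldl_cons, ih, buy_stepA]
      by_cases h1 : pvType tx == "buy" <;> by_cases h2 : pvWallet tx = w <;>
        simp [h1, h2] <;> omega

theorem sell_foldl_stepA (l : List (List (String × String))) (d : PySem.Dict String (PySem.Dict String Int)) (w : String) :
    ((l.foldl pvStepA d).getD w PySem.Dict.empty).getD "sell" 0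
      = (d.getD w PySem.Dict.empty).getD "sell" 0
        + (((l.filter (fun tx => pvType tx == "sell")).map pvWallet).count w : Int) := by
  induction l generalizing d with
  | nil => simp
  | cons tx l ih =>
      rw [List.foldl_cons, ih, sell_stepA]
      by_cases h1 : pvType tx == "sell" <;> by_cases h2 : pvWallet tx = w <;>
        simp [h1, h2] <;> omega

theorem items_map_getD {ν β : Type} (d : PySem.Dict String ν) (e : ν) (g : String → ν → β)
    (h : d.keys.Nodup) :
    d.items.map (fun p => (p.1, g p.1 p.2)) = d.keys.map (fun k => (k, g k (d.getD k e))) := by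
  have hkeys : d.keys = d.items.map (fun p => p.1) := rfl
  rw [hkeys, List.map_map]
  refine List.map_congr_left (fun p hp => ?_)
  have := PySem.Dict.getD_of_mem_items (d := d) (d0 := e) (by exact hp) h
  simp [this]

theorem nodup_keys_foldl_stepA (l : List (List (String × String))) :
    (l.foldl pvStepA PySem.Dict.empty).keys.Nodup := by
  rw [keys_foldl_stepA]
  exact PySem.Set.nodup_ofList _

-- ===== VERDICT (by name: the statement is the Claim_ definition above) =====
theorem count_wallet_transactions_spec : Claim_equal_count_wallet_transactions := by
  intro l _ _
  unfold Spec_count_wallet_transactions count_wallet_transactions count_wallet_transactions_alt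
  rw [items_map_getD _ PySem.Dict.empty
        (fun _ v => pvFmt (v.getD "buy" 0) (v.getD "sell" 0)) (nodup_keys_foldl_stepA l)]
  rw [keys_foldl_stepA]
  have hded : PySem.List.dedup (l.map pvWallet)
      = PySem.Set.update (PySem.Dict.empty (κ := String) (ν := PySem.Dict String Int)).keys (l.map pvWallet) := rfl
  rw [← hded]
  refine List.map_congr_left (fun w _ => ?_)
  have hb := buy_foldl_stepA l PySem.Dict.empty w
  have hs := sell_foldl_stepA l PySem.Dict.empty w
  simp [PySem.Dict.getD_empty] at hb hs
  rw [hb, hs]
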